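-- pv_equiv track=rewrite | github.com/minyoungcho99/Programming-Basics | Python/final.py | simplestDirections
-- ===== SOURCE A (Python) =====
-- def simplestDirections(directions):
--     udCounter = 0
--     lrCounter = 0
--     ud = ""
--     lr = ""
--     for m in directions:
--         if m == "U":
--             udCounter += 1
--         if m == "D":
--             udCounter -= 1
--         if m == ">":
--             lrCounter += 1
--         if m == "<":
--             lrCounter -= 1
--     if udCounter > 0:
--         ud = "up"
--     else:
--         ud = "down"
--     if lrCounter > 0:
--         lr = "right"
--     else:
--         lr = "left"
--     if udCounter == 0 and lrCounter == 0:
--         return "No movement."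
--     else:
--         return "You have moved {} blocks {} and {} blocks {}.".format(abs(udCounter), ud, abs(lrCounter), lr)
-- ===== SOURCE B (Python) =====
-- DELTA = {"U": (1, 0), "D": (-1, 0), ">": (0, 1), "<": (0, -1)}
--
--
-- def _net(directions, lo, hi):
--     # divide and conquer: net displacement vector over directions[lo:hi]
--     if hi - lo == 0:
--         return (0, 0)
--     if hi - lo == 1:
--         return DELTA.get(directions[lo], (0, 0))
--     mid = (lo + hi) // 2
--     u1, l1 = _net(directions, lo, mid)
--     u2, l2 = _net(directions, mid, hi)
--     return (u1 + u2, l1 + l2)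
--
--
-- def simplestDirections(directions):
--     ud, lr = _net(directions, 0, len(directions))
--     if ud == 0 and lr == 0:
--         return "No movement."
--     return "You have moved {} blocks {} and {} blocks {}.".format(
--         abs(ud), "up" if ud > 0 else "down",
--         abs(lr), "right" if lr > 0 else "left")
-- ===== Notes on version B (the rewrite author's own statement) =====
-- stated objective: alternative
-- what changed: Replaces the linear four-branch counting loop by a divide-and-conquer recursion over index ranges that maps each move to a displacement vector via a table and sums the vectors of the two halves.
import Mathlib
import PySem

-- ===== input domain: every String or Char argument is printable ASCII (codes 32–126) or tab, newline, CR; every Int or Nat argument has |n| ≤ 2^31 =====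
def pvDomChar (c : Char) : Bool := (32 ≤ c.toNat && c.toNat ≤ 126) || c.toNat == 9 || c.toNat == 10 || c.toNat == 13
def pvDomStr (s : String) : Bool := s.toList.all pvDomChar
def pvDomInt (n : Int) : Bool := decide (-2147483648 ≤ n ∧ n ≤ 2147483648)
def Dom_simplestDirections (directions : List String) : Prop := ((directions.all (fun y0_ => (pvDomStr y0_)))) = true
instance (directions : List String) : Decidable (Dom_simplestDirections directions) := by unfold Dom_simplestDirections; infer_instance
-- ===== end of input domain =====

-- B replaces A's linear four-branch counting loop by a divide-and-conquer recursion over index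
-- ranges summing table-looked-up move vectors (alternative; same cost).

-- ===== PORT A =====
def simplestDirections (directions : List String) : String :=
  let p := directions.foldl (fun (p : Int × Int) m =>
    let p := if m == "U" then (p.1 + 1, p.2) else p
    let p := if m == "D" then (p.1 - 1, p.2) else p
    let p := if m == ">" then (p.1, p.2 + 1) else p
    let p := if m == "<" then (p.1, p.2 - 1) else p
    p) (0, 0)
  let udCounter := p.1
  let lrCounter := p.2
  let ud := if udCounter > 0 then "up" else "down"
  let lr := if lrCounter > 0 then "right" else "left"
  if udCounter = 0 ∧ lrCounter = 0 then "No movement."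
  else "You have moved " ++ PySem.Int.toStr |udCounter| ++ " blocks " ++ ud ++
       " and " ++ PySem.Int.toStr |lrCounter| ++ " blocks " ++ lr ++ "."

-- ===== PORT B =====
-- DELTA = {"U": (1, 0), "D": (-1, 0), ">": (0, 1), "<": (0, -1)}
def pvDELTA : PySem.Dict String (Int × Int) :=
  PySem.Dict.ofList [("U", (1, 0)), ("D", (-1, 0)), (">", (0, 1)), ("<", (0, -1))]

-- _net(directions, lo, hi): indices lo, hi are nonnegative throughout (0 ≤ lo ≤ hi ≤ len), so Nat
-- is exact; directions[lo] is in range on every call, so getD's default is never used.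
-- fuel = hi - lo bounds the recursion depth; it only makes the same computation total
-- (each recursive call is on a strictly shorter range), the algorithm is unchanged.
def pvNetGo (directions : List String) : Nat → Nat → Nat → Int × Int
  | 0, _, _ => (0, 0)
  | fuel + 1, lo, hi =>
    if hi - lo = 0 then (0, 0)
    else if hi - lo = 1 then pvDELTA.getD (directions.getD lo "") (0, 0)
    else
      let mid := (lo + hi) / 2
      let p1 := pvNetGo directions fuel lo mid
      let p2 := pvNetGo directions fuel mid hi
      (p1.1 + p2.1, p1.2 + p2.2)

def pvNet (directions : List String) (lo hi : Nat) : Int × Int :=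
  pvNetGo directions (hi - lo) lo hi

def simplestDirections_alt (directions : List String) : String :=
  let p := pvNet directions 0 directions.length
  let ud := p.1
  let lr := p.2
  if ud = 0 ∧ lr = 0 then "No movement."
  else "You have moved " ++ PySem.Int.toStr |ud| ++ " blocks " ++
       (if ud > 0 then "up" else "down") ++
       " and " ++ PySem.Int.toStr |lr| ++ " blocks " ++
       (if lr > 0 then "right" else "left") ++ "."

-- ===== PRECONDITION & SPEC =====
def Spec_simplestDirections (directions : List String) (out : String) : Prop := out = simplestDirections_alt directions
instance (directions : List String) (out : String) : Decidable (Spec_simplestDirections directions out) := by unfold Spec_simplestDirections; infer_instance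

-- ===== CLAIM =====
def Claim_equal_simplestDirections : Prop := ∀ (directions : List String), Dom_simplestDirections directions → Spec_simplestDirections directions (simplestDirections directions)

-- ===== LEMMAS AND PROOFS =====
-- the net displacement of a list, as A counts it
def pvNetSpec (l : List String) : Int × Int :=
  ((l.count "U" : Int) - (l.count "D" : Int), (l.count ">" : Int) - (l.count "<" : Int))

theorem pvNetSpec_append (l₁ l₂ : List String) :
    pvNetSpec (l₁ ++ l₂) = (( (pvNetSpec l₁).1 + (pvNetSpec l₂).1, (pvNetSpec l₁).2 + (pvNetSpec l₂).2)) := by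
  simp [pvNetSpec, List.count_append]; constructor <;> ring

theorem pvNetSpec_singleton (x : String) :
    pvDELTA.getD x (0, 0) = pvNetSpec [x] := by
  by_cases hU : x = "U"
  · subst hU; decide
  by_cases hD : x = "D"
  · subst hD; decide
  by_cases hG : x = ">"
  · subst hG; decide
  by_cases hL : x = "<"
  · subst hL; decide
  have hmk : pvDELTA = PySem.Dict.mk [("U", (1, 0)), ("D", (-1, 0)), (">", (0, 1)), ("<", (0, -1))] := by rfl
  rw [hmk]
  simp [pvNetSpec, PySem.Dict.getD_eq_get?_getD, PySem.Dict.get?,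
    Ne.symm hU, Ne.symm hD, Ne.symm hG, Ne.symm hL, hU, hD, hG, hL]

theorem pvNet_eq_spec (directions : List String) :
    ∀ n lo hi, hi - lo ≤ n → hi ≤ directions.length →
      pvNetGo directions n lo hi = pvNetSpec ((directions.drop lo).take (hi - lo)) := by
  intro n
  induction n with
  | zero =>
    intro lo hi h _
    rw [pvNetGo]
    simp [Nat.le_zero.mp h, pvNetSpec]
  | succ n ih =>
    intro lo hi h hlen
    rw [pvNetGo]
    by_cases h0 : hi - lo = 0
    · simp [h0, pvNetSpec]
    · by_cases h1 : hi - lo = 1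
      · have hlo : lo < directions.length := by omega
        have htake : (directions.drop lo).take 1 = [directions[lo]] :=
          List.take_one_drop_eq_of_lt_length hlo
        rw [if_neg h0, if_pos h1, h1, htake, List.getD_eq_getElem _ _ hlo, pvNetSpec_singleton]
      · simp only [h0, h1, if_false]
        have hm1 : lo < (lo + hi) / 2 := by omega
        have hm2 : (lo + hi) / 2 < hi := by omega
        have ha1 : (lo + hi) / 2 - lo ≤ n := by omega
        have ha2 : hi - (lo + hi) / 2 ≤ n := by omega
        have hb1 : (lo + hi) / 2 ≤ directions.length := by omega
        rw [ih lo ((lo + hi) / 2) ha1 hb1, ih ((lo + hi) / 2) hi ha2 hlen]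
        have hsplit : (directions.drop lo).take (hi - lo)
            = (directions.drop lo).take ((lo + hi) / 2 - lo)
              ++ (directions.drop ((lo + hi) / 2)).take (hi - (lo + hi) / 2) := by
          have he : hi - lo = ((lo + hi) / 2 - lo) + (hi - (lo + hi) / 2) := by omega
          have hc : lo + ((lo + hi) / 2 - lo) = (lo + hi) / 2 := by omega
          rw [he, List.take_add, List.drop_drop, hc]
        rw [hsplit, pvNetSpec_append]

theorem pvNet_full (directions : List String) :
    pvNet directions 0 directions.length = pvNetSpec directions := by
  rw [pvNet, pvNet_eq_spec directions (directions.length - 0) 0 directions.length (by omega) (by omega)]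
  simp

theorem simplestDirections_foldl (l : List String) (a b : Int) :
    l.foldl (fun (p : Int × Int) m =>
      let p := if m == "U" then (p.1 + 1, p.2) else p
      let p := if m == "D" then (p.1 - 1, p.2) else p
      let p := if m == ">" then (p.1, p.2 + 1) else p
      let p := if m == "<" then (p.1, p.2 - 1) else p
      p) (a, b)
    = (a + (l.count "U" : Int) - (l.count "D" : Int),
       b + (l.count ">" : Int) - (l.count "<" : Int)) := by
  induction l generalizing a b with
  | nil => simp
  | cons x xs ih =>
    simp only [List.foldl_cons, List.count_cons]
    by_cases hU : x = "U" <;> by_cases hD : x = "D" <;> by_cases hG : x = ">" <;>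
      by_cases hL : x = "<" <;>
      simp_all <;> omega

-- ===== VERDICT =====
theorem simplestDirections_spec : Claim_equal_simplestDirections := by
  intro directions _
  show simplestDirections directions = simplestDirections_alt directions
  unfold simplestDirections simplestDirections_alt
  rw [simplestDirections_foldl, pvNet_full]
  simp only [pvNetSpec, zero_add]
  rfl
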